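-- pv_equiv track=rewrite | github.com/kali-twilio/gtm-hub | backend/apps/se_scorecard_v2/scorecard.py | _opp_filter_for_child
-- ===== SOURCE A (Python) =====
-- def _opp_filter_for_child(soql_filter: str) -> str:
--     """Rewrite an Opportunity soql_filter for use in a child-object WHERE clause.
--
--     When querying FROM Demo_Engineering_Request__c, all Opportunity field
--     references must be prefixed with Opportunity__r. so Salesforce can
--     traverse the parent relationship.
--     """
--     # Order matters: replace longer/more-specific patterns first so we don't
--     # double-prefix anything.
--     replacements = [
--         ("Technical_Lead__r.",   "Opportunity__r.Technical_Lead__r."),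
--         ("FY_16_Owner_Team__c",  "Opportunity__r.FY_16_Owner_Team__c"),
--         ("Owner.UserRole.Name",  "Opportunity__r.Owner.UserRole.Name"),
--         ("Owner.Name",           "Opportunity__r.Owner.Name"),
--     ]
--     result = soql_filter
--     for old, new in replacements:
--         result = result.replace(old, new)
--     return result
-- ===== SOURCE B (Python) =====
-- import re
--
-- _OPP_FIELDS = (
--     "Technical_Lead__r.",
--     "FY_16_Owner_Team__c",
--     "Owner.UserRole.Name",
--     "Owner.Name",
-- )
-- _OPP_FIELD_RE = re.compile("|".join(re.escape(f) for f in _OPP_FIELDS))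
--
--
-- def _opp_filter_for_child(soql_filter: str) -> str:
--     """Rewrite an Opportunity soql_filter for use in a child-object WHERE clause.
--
--     One combined left-to-right scan: a single regex alternation (longer /
--     more specific patterns first) replaces each field reference with its
--     Opportunity__r.-prefixed form in one pass.
--     """
--     return _OPP_FIELD_RE.sub(lambda m: "Opportunity__r." + m.group(0), soql_filter)
-- ===== Notes on version B (the rewrite author's own statement) =====
-- stated objective: idiomatic
-- what changed: A makes four sequential full-string str.replace passes, one per field pattern; B compiles a single regex alternation over the four (mutually non-overlapping) literal patterns and rewrites the string in one combined left-to-right re.sub scan, prepending the parent-relationship prefix to each match.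
import Mathlib
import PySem

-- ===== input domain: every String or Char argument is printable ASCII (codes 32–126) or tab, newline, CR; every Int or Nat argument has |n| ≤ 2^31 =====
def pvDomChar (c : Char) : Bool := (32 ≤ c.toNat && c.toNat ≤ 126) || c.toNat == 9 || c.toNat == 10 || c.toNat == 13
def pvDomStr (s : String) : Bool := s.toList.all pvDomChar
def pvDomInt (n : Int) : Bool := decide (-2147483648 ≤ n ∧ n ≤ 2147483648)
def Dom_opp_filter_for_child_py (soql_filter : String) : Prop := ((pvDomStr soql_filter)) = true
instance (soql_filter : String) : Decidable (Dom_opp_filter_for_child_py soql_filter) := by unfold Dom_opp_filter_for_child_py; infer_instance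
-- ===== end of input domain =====

-- B replaces A's four sequential str.replace passes by ONE combined left-to-right scan
-- (in Python: a single compiled regex alternation with re.sub); objective: idiomatic/alternative, same results.

-- ===== PORT A =====
-- literal transliteration of A: a list of (old, new) pairs folded left with str.replace
def opp_filter_for_child_py (soql_filter : String) : String :=
  let replacements : List (String × String) :=
    [("Technical_Lead__r.",  "Opportunity__r.Technical_Lead__r."),
     ("FY_16_Owner_Team__c", "Opportunity__r.FY_16_Owner_Team__c"),
     ("Owner.UserRole.Name", "Opportunity__r.Owner.UserRole.Name"),
     ("Owner.Name",          "Opportunity__r.Owner.Name")]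
  replacements.foldl (fun result p => PySem.Str.replace result p.1 p.2) soql_filter

-- ===== PORT B =====
-- B-side helpers: the four literal patterns of the regex alternation (in order) and the inserted prefix
def pvP1 : List Char := "Technical_Lead__r.".toList
def pvP2 : List Char := "FY_16_Owner_Team__c".toList
def pvP3 : List Char := "Owner.UserRole.Name".toList
def pvP4 : List Char := "Owner.Name".toList
def pvPrefix : List Char := "Opportunity__r.".toList

-- exact semantics of Source B's `_OPP_FIELD_RE.sub(lambda m: "Opportunity__r." + m.group(0), s)`:
-- one left-to-right scan; at each position the alternation tries the four literals in order,
-- on a match emits the prefix plus the matched literal and resumes after it, else copies the char.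
def pvScan : List Char → List Char
  | [] => []
  | c :: t =>
    if pvP1.isPrefixOf (c :: t) then pvPrefix ++ pvP1 ++ pvScan (List.drop pvP1.length (c :: t))
    else if pvP2.isPrefixOf (c :: t) then pvPrefix ++ pvP2 ++ pvScan (List.drop pvP2.length (c :: t))
    else if pvP3.isPrefixOf (c :: t) then pvPrefix ++ pvP3 ++ pvScan (List.drop pvP3.length (c :: t))
    else if pvP4.isPrefixOf (c :: t) then pvPrefix ++ pvP4 ++ pvScan (List.drop pvP4.length (c :: t))
    else c :: pvScan t
termination_by l => l.length
decreasing_by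
  all_goals simp [List.length_drop, pvP1, pvP2, pvP3, pvP4]

def opp_filter_for_child_py_alt (soql_filter : String) : String :=
  String.ofList (pvScan soql_filter.toList)

-- ===== PRECONDITION & SPEC =====
def Spec_opp_filter_for_child_py (soql_filter : String) (out : String) : Prop := out = opp_filter_for_child_py_alt soql_filter
instance (soql_filter : String) (out : String) : Decidable (Spec_opp_filter_for_child_py soql_filter out) := by unfold Spec_opp_filter_for_child_py; infer_instance

-- ===== CLAIM (what is proved, stated in full; the proofs are below) =====
def Claim_equal_opp_filter_for_child_py : Prop := ∀ (soql_filter : String), Dom_opp_filter_for_child_py soql_filter → Spec_opp_filter_for_child_py soql_filter (opp_filter_for_child_py soql_filter)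

-- ===== LEMMAS AND PROOFS =====

-- a clean recursive model of Python's str.replace (for nonempty `old`)
def pvRep (old new : List Char) : List Char → List Char
  | [] => []
  | c :: t =>
    if old.isPrefixOf (c :: t) then new ++ pvRep old new (List.drop (old.length - 1) t)
    else c :: pvRep old new t
termination_by l => l.length
decreasing_by
  all_goals simp [List.length_drop]

lemma pvRep_nil (old new : List Char) : pvRep old new [] = [] := by rw [pvRep.eq_1]

lemma pvRep_match (old new : List Char) (c : Char) (t : List Char)
    (hne : old ≠ []) (h : old <+: (c :: t)) :
    pvRep old new (c :: t) = new ++ pvRep old new (List.drop old.length (c :: t)) := by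
  rw [pvRep.eq_2, if_pos ((List.isPrefixOf_iff_prefix).2 h)]
  obtain ⟨n, hn⟩ : ∃ n, old.length = n + 1 := by
    cases old with
    | nil => exact absurd rfl hne
    | cons a l => exact ⟨l.length, rfl⟩
  rw [hn]
  simp [List.drop_succ_cons]

lemma pvRep_nomatch (old new : List Char) (c : Char) (t : List Char)
    (h : ¬ old <+: (c :: t)) :
    pvRep old new (c :: t) = c :: pvRep old new t := by
  rw [pvRep.eq_2, if_neg (fun hb => h ((List.isPrefixOf_iff_prefix).1 hb))]

lemma pvRep_head (old new u : List Char) (hne : old ≠ []) :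
    pvRep old new (old ++ u) = new ++ pvRep old new u := by
  cases old with
  | nil => exact absurd rfl hne
  | cons o ol =>
    rw [show (o :: ol) ++ u = o :: (ol ++ u) from rfl]
    rw [pvRep_match (o :: ol) new o (ol ++ u) (by simp) ⟨u, by simp⟩]
    rw [show List.drop (o :: ol).length (o :: (ol ++ u)) = List.drop ol.length (ol ++ u) from by
      simp [List.drop_succ_cons]]
    rw [List.drop_left]

-- equation helpers for PySem's replace.go
lemma pvGo_zero (old new l acc : List Char) :
    PySem.Chars.replace.go old new 0 l acc = acc.reverse ++ l := by
  rw [PySem.Chars.replace.go.eq_def]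

lemma pvGo_nil (old new acc : List Char) (n : Nat) :
    PySem.Chars.replace.go old new (n + 1) [] acc = acc.reverse := by
  rw [PySem.Chars.replace.go.eq_def]

lemma pvGo_cons (old new : List Char) (n : Nat) (c : Char) (t acc : List Char) :
    PySem.Chars.replace.go old new (n + 1) (c :: t) acc =
      if old.isPrefixOf (c :: t) then
        PySem.Chars.replace.go old new n (List.drop old.length (c :: t)) (new.reverse ++ acc)
      else PySem.Chars.replace.go old new n t (c :: acc) := by
  rw [PySem.Chars.replace.go.eq_def]

-- go computes pvRep (fuel ≥ length)
lemma pvGo_eq (old new : List Char) (hne : old ≠ []) :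
    ∀ (fuel : Nat) (l acc : List Char), l.length ≤ fuel →
      PySem.Chars.replace.go old new fuel l acc = acc.reverse ++ pvRep old new l := by
  intro fuel
  induction fuel with
  | zero =>
    intro l acc hl
    have : l = [] := List.length_eq_zero_iff.1 (Nat.le_zero.1 hl)
    subst this
    simp [pvGo_zero, pvRep_nil]
  | succ n IH =>
    intro l acc hl
    cases l with
    | nil => simp [pvGo_nil, pvRep_nil]
    | cons c t =>
      rw [pvGo_cons]
      by_cases hp : old <+: (c :: t)
      · rw [if_pos ((List.isPrefixOf_iff_prefix).2 hp)]
        rw [IH _ _ (by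
          have h1 : 1 ≤ old.length := by
            cases old with
            | nil => exact absurd rfl hne
            | cons a l => simp
          simp only [List.length_drop, List.length_cons] at *
          omega)]
        rw [pvRep_match old new c t hne hp]
        simp
      · rw [if_neg (fun hb => hp ((List.isPrefixOf_iff_prefix).1 hb))]
        rw [IH _ _ (by simp at hl; omega)]
        rw [pvRep_nomatch old new c t hp]
        simp

lemma pvReplace_eq (s old new : List Char) (hne : old ≠ []) :
    PySem.Chars.replace s old new = pvRep old new s := by
  unfold PySem.Chars.replace
  rw [if_neg (by simp [List.isEmpty_iff, hne])]
  simpa using pvGo_eq old new hne s.length s [] le_rfl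

-- a prefix of an append is a prefix of the first part or extends it
lemma pvPrefix_append_cases {p x u : List Char} (h : p <+: x ++ u) : p <+: x ∨ x <+: p := by
  rcases h with ⟨r, hr⟩
  by_cases hl : p.length ≤ x.length
  · left
    have h1 : p = (x ++ u).take p.length := by
      rw [← hr]; simp [List.take_append]
    have h2 : (x ++ u).take p.length = x.take p.length := by
      simp
      omega
    rw [h1, h2]
    exact List.take_prefix _ _
  · right
    have h1 : x = (x ++ u).take x.length := by simp
    have h2 : (x ++ u).take x.length = p.take x.length := by
      rw [← hr, List.take_append]
      simp
      omega
    rw [h1, h2]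
    exact List.take_prefix _ _

-- replace skips a block that starts no match
lemma pvRep_skip (old new : List Char) :
    ∀ (m : Nat) (s : List Char), (∀ k < m, ¬ old <+: s.drop k) →
      pvRep old new s = s.take m ++ pvRep old new (s.drop m) := by
  intro m
  induction m with
  | zero => intro s _; simp
  | succ n IH =>
    intro s hs
    cases s with
    | nil => simp [pvRep_nil]
    | cons c t =>
      rw [pvRep_nomatch old new c t (by simpa using hs 0 (Nat.succ_pos n))]
      rw [IH t (fun k hk => by simpa using hs (k + 1) (by omega))]
      simp

-- replace passes over a block x that cannot interact with old
lemma pvRep_append (old new x u : List Char)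
    (hcf : ∀ k < x.length, ¬ old <+: x.drop k ∧ ¬ x.drop k <+: old) :
    pvRep old new (x ++ u) = x ++ pvRep old new u := by
  have h := pvRep_skip old new x.length (x ++ u) (by
    intro k hk hp
    rw [List.drop_append_of_le_length (by omega)] at hp
    rcases pvPrefix_append_cases hp with h1 | h1
    · exact (hcf k hk).1 h1
    · exact (hcf k hk).2 h1)
  rw [h]
  simp

-- replace never creates a new occurrence of p when new cannot interact with p's suffixes
lemma pvRep_preserve (old new p : List Char)
    (hcf : ∀ k < p.length, ¬ p.drop k <+: new ∧ ¬ new <+: p.drop k) :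
    ∀ (s : List Char) (k : Nat), k < p.length → ¬ p.drop k <+: s → ¬ p.drop k <+: pvRep old new s := by
  intro s
  induction s with
  | nil =>
    intro k hk hns
    simpa [pvRep_nil] using hns
  | cons c t IH =>
    intro k hk hns
    by_cases hm : old.isPrefixOf (c :: t)
    · rw [show pvRep old new (c :: t) = new ++ pvRep old new (List.drop (old.length - 1) t) from by
        rw [pvRep.eq_2, if_pos hm]]
      intro hpre
      rcases pvPrefix_append_cases hpre with h1 | h1
      · exact (hcf k hk).1 h1
      · exact (hcf k hk).2 h1
    · rw [pvRep_nomatch old new c t (fun hb => hm ((List.isPrefixOf_iff_prefix).2 hb))]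
      intro hpre
      obtain ⟨q0, q', hq⟩ : ∃ q0 q', p.drop k = q0 :: q' := by
        cases hd : p.drop k with
        | nil =>
          exfalso
          have := List.drop_eq_nil_iff.1 hd
          omega
        | cons a l => exact ⟨a, l, rfl⟩
      have hq' : p.drop (k + 1) = q' := by
        have := congrArg List.tail hq
        simpa [List.tail_drop] using this
      rw [hq] at hpre hns
      obtain ⟨hc, hq'pre⟩ := List.cons_prefix_cons.1 hpre
      subst hc
      by_cases hend : k + 1 < p.length
      · have hnt : ¬ p.drop (k + 1) <+: t := by
          rw [hq']
          exact fun hcon => hns (List.cons_prefix_cons.2 ⟨rfl, hcon⟩)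
        have := IH (k + 1) hend hnt
        rw [hq'] at this
        exact this hq'pre
      · have hq'nil : q' = [] := by
          rw [← hq']
          exact List.drop_eq_nil_iff.2 (by omega)
        subst hq'nil
        exact hns (List.cons_prefix_cons.2 ⟨rfl, List.nil_prefix⟩)

-- the four replaced forms, as char lists
def pvN1 : List Char := pvPrefix ++ pvP1
def pvN2 : List Char := pvPrefix ++ pvP2
def pvN3 : List Char := pvPrefix ++ pvP3
def pvN4 : List Char := pvPrefix ++ pvP4

lemma pvScan_nil : pvScan [] = [] := by rw [pvScan.eq_1]

lemma pvScan_match1 (c : Char) (t : List Char) (h : pvP1 <+: (c :: t)) :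
    pvScan (c :: t) = pvPrefix ++ pvP1 ++ pvScan (List.drop pvP1.length (c :: t)) := by
  rw [pvScan.eq_2, if_pos ((List.isPrefixOf_iff_prefix).2 h)]

lemma pvScan_match2 (c : Char) (t : List Char) (h1 : ¬ pvP1 <+: (c :: t)) (h : pvP2 <+: (c :: t)) :
    pvScan (c :: t) = pvPrefix ++ pvP2 ++ pvScan (List.drop pvP2.length (c :: t)) := by
  rw [pvScan.eq_2, if_neg (fun hb => h1 ((List.isPrefixOf_iff_prefix).1 hb)),
    if_pos ((List.isPrefixOf_iff_prefix).2 h)]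

lemma pvScan_match3 (c : Char) (t : List Char) (h1 : ¬ pvP1 <+: (c :: t)) (h2 : ¬ pvP2 <+: (c :: t))
    (h : pvP3 <+: (c :: t)) :
    pvScan (c :: t) = pvPrefix ++ pvP3 ++ pvScan (List.drop pvP3.length (c :: t)) := by
  rw [pvScan.eq_2, if_neg (fun hb => h1 ((List.isPrefixOf_iff_prefix).1 hb)),
    if_neg (fun hb => h2 ((List.isPrefixOf_iff_prefix).1 hb)),
    if_pos ((List.isPrefixOf_iff_prefix).2 h)]

lemma pvScan_match4 (c : Char) (t : List Char) (h1 : ¬ pvP1 <+: (c :: t)) (h2 : ¬ pvP2 <+: (c :: t))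
    (h3 : ¬ pvP3 <+: (c :: t)) (h : pvP4 <+: (c :: t)) :
    pvScan (c :: t) = pvPrefix ++ pvP4 ++ pvScan (List.drop pvP4.length (c :: t)) := by
  rw [pvScan.eq_2, if_neg (fun hb => h1 ((List.isPrefixOf_iff_prefix).1 hb)),
    if_neg (fun hb => h2 ((List.isPrefixOf_iff_prefix).1 hb)),
    if_neg (fun hb => h3 ((List.isPrefixOf_iff_prefix).1 hb)),
    if_pos ((List.isPrefixOf_iff_prefix).2 h)]

lemma pvScan_nomatch (c : Char) (t : List Char) (h1 : ¬ pvP1 <+: (c :: t)) (h2 : ¬ pvP2 <+: (c :: t))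
    (h3 : ¬ pvP3 <+: (c :: t)) (h4 : ¬ pvP4 <+: (c :: t)) :
    pvScan (c :: t) = c :: pvScan t := by
  rw [pvScan.eq_2, if_neg (fun hb => h1 ((List.isPrefixOf_iff_prefix).1 hb)),
    if_neg (fun hb => h2 ((List.isPrefixOf_iff_prefix).1 hb)),
    if_neg (fun hb => h3 ((List.isPrefixOf_iff_prefix).1 hb)),
    if_neg (fun hb => h4 ((List.isPrefixOf_iff_prefix).1 hb))]

-- the heart: the four sequential replaces equal the single combined scan
lemma pvChain_eq_scan : ∀ (s : List Char),
    pvRep pvP4 pvN4 (pvRep pvP3 pvN3 (pvRep pvP2 pvN2 (pvRep pvP1 pvN1 s))) = pvScan s := by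
  suffices H : ∀ (n : Nat) (s : List Char), s.length ≤ n →
      pvRep pvP4 pvN4 (pvRep pvP3 pvN3 (pvRep pvP2 pvN2 (pvRep pvP1 pvN1 s))) = pvScan s by
    exact fun s => H s.length s le_rfl
  intro n
  induction n with
  | zero =>
    intro s hs
    have : s = [] := List.length_eq_zero_iff.1 (Nat.le_zero.1 hs)
    subst this
    simp [pvRep_nil, pvScan_nil]
  | succ n IH =>
    intro s hs
    cases s with
    | nil => simp [pvRep_nil, pvScan_nil]
    | cons c t =>
      simp only [List.length_cons] at hs
      by_cases h1 : pvP1 <+: (c :: t)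
      · rcases h1 with ⟨u, hu⟩
        have hlen : u.length ≤ n := by
          have : (pvP1 ++ u).length = t.length + 1 := by rw [hu]; simp
          simp [pvP1] at this
          omega
        have hsc := pvScan_match1 c t ⟨u, hu⟩
        rw [← hu] at hsc ⊢
        rw [pvRep_head pvP1 pvN1 u (by decide)]
        rw [show pvN1 ++ pvRep pvP1 pvN1 u = (pvPrefix ++ pvP1) ++ pvRep pvP1 pvN1 u from rfl]
        rw [pvRep_append pvP2 pvN2 (pvPrefix ++ pvP1) _ (by decide)]
        rw [pvRep_append pvP3 pvN3 (pvPrefix ++ pvP1) _ (by decide)]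
        rw [pvRep_append pvP4 pvN4 (pvPrefix ++ pvP1) _ (by decide)]
        rw [IH u hlen, hsc, show List.drop pvP1.length (pvP1 ++ u) = u from List.drop_left]
      · by_cases h2 : pvP2 <+: (c :: t)
        · rcases h2 with ⟨u, hu⟩
          have hlen : u.length ≤ n := by
            have : (pvP2 ++ u).length = t.length + 1 := by rw [hu]; simp
            simp [pvP2] at this
            omega
          have hsc := pvScan_match2 c t h1 ⟨u, hu⟩
          rw [← hu] at hsc ⊢
          rw [pvRep_append pvP1 pvN1 pvP2 u (by decide)]
          rw [pvRep_head pvP2 pvN2 _ (by decide)]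
          rw [show pvN2 ++ pvRep pvP2 pvN2 (pvRep pvP1 pvN1 u) = (pvPrefix ++ pvP2) ++ pvRep pvP2 pvN2 (pvRep pvP1 pvN1 u) from rfl]
          rw [pvRep_append pvP3 pvN3 (pvPrefix ++ pvP2) _ (by decide)]
          rw [pvRep_append pvP4 pvN4 (pvPrefix ++ pvP2) _ (by decide)]
          rw [IH u hlen, hsc, show List.drop pvP2.length (pvP2 ++ u) = u from List.drop_left]
        · by_cases h3 : pvP3 <+: (c :: t)
          · rcases h3 with ⟨u, hu⟩
            have hlen : u.length ≤ n := by
              have : (pvP3 ++ u).length = t.length + 1 := by rw [hu]; simp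
              simp [pvP3] at this
              omega
            have hsc := pvScan_match3 c t h1 h2 ⟨u, hu⟩
            rw [← hu] at hsc ⊢
            rw [pvRep_append pvP1 pvN1 pvP3 u (by decide)]
            rw [pvRep_append pvP2 pvN2 pvP3 _ (by decide)]
            rw [pvRep_head pvP3 pvN3 _ (by decide)]
            rw [show pvN3 ++ pvRep pvP3 pvN3 (pvRep pvP2 pvN2 (pvRep pvP1 pvN1 u)) = (pvPrefix ++ pvP3) ++ pvRep pvP3 pvN3 (pvRep pvP2 pvN2 (pvRep pvP1 pvN1 u)) from rfl]
            rw [pvRep_append pvP4 pvN4 (pvPrefix ++ pvP3) _ (by decide)]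
            rw [IH u hlen, hsc, show List.drop pvP3.length (pvP3 ++ u) = u from List.drop_left]
          · by_cases h4 : pvP4 <+: (c :: t)
            · rcases h4 with ⟨u, hu⟩
              have hlen : u.length ≤ n := by
                have : (pvP4 ++ u).length = t.length + 1 := by rw [hu]; simp
                simp [pvP4] at this
                omega
              have hsc := pvScan_match4 c t h1 h2 h3 ⟨u, hu⟩
              rw [← hu] at hsc ⊢
              rw [pvRep_append pvP1 pvN1 pvP4 u (by decide)]
              rw [pvRep_append pvP2 pvN2 pvP4 _ (by decide)]
              rw [pvRep_append pvP3 pvN3 pvP4 _ (by decide)]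
              rw [pvRep_head pvP4 pvN4 _ (by decide)]
              rw [IH u hlen, hsc, show List.drop pvP4.length (pvP4 ++ u) = u from List.drop_left]
              simp [pvN4]
            · -- no pattern matches here: every pass copies c
              have e1 : pvRep pvP1 pvN1 (c :: t) = c :: pvRep pvP1 pvN1 t :=
                pvRep_nomatch _ _ _ _ h1
              have a2 : ¬ pvP2 <+: pvRep pvP1 pvN1 (c :: t) := by
                have := pvRep_preserve pvP1 pvN1 pvP2 (by decide) (c :: t) 0 (by decide)
                  (by simpa using h2)
                simpa using this
              have e2 : pvRep pvP2 pvN2 (pvRep pvP1 pvN1 (c :: t))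
                  = c :: pvRep pvP2 pvN2 (pvRep pvP1 pvN1 t) := by
                rw [e1] at a2 ⊢
                exact pvRep_nomatch _ _ _ _ a2
              have a3 : ¬ pvP3 <+: pvRep pvP2 pvN2 (pvRep pvP1 pvN1 (c :: t)) := by
                have s1 := pvRep_preserve pvP1 pvN1 pvP3 (by decide) (c :: t) 0 (by decide)
                  (by simpa using h3)
                have s2 := pvRep_preserve pvP2 pvN2 pvP3 (by decide) (pvRep pvP1 pvN1 (c :: t)) 0
                  (by decide) (by simpa using s1)
                simpa using s2
              have e3 : pvRep pvP3 pvN3 (pvRep pvP2 pvN2 (pvRep pvP1 pvN1 (c :: t)))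
                  = c :: pvRep pvP3 pvN3 (pvRep pvP2 pvN2 (pvRep pvP1 pvN1 t)) := by
                rw [e2] at a3 ⊢
                exact pvRep_nomatch _ _ _ _ a3
              have a4 : ¬ pvP4 <+: pvRep pvP3 pvN3 (pvRep pvP2 pvN2 (pvRep pvP1 pvN1 (c :: t))) := by
                have s1 := pvRep_preserve pvP1 pvN1 pvP4 (by decide) (c :: t) 0 (by decide)
                  (by simpa using h4)
                have s2 := pvRep_preserve pvP2 pvN2 pvP4 (by decide) (pvRep pvP1 pvN1 (c :: t)) 0
                  (by decide) (by simpa using s1)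
                have s3 := pvRep_preserve pvP3 pvN3 pvP4 (by decide)
                  (pvRep pvP2 pvN2 (pvRep pvP1 pvN1 (c :: t))) 0 (by decide) (by simpa using s2)
                simpa using s3
              have e4 : pvRep pvP4 pvN4 (pvRep pvP3 pvN3 (pvRep pvP2 pvN2 (pvRep pvP1 pvN1 (c :: t))))
                  = c :: pvRep pvP4 pvN4 (pvRep pvP3 pvN3 (pvRep pvP2 pvN2 (pvRep pvP1 pvN1 t))) := by
                rw [e3] at a4 ⊢
                exact pvRep_nomatch _ _ _ _ a4
              rw [e4, IH t (by omega), pvScan_nomatch c t h1 h2 h3 h4]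

-- ===== VERDICT (by name: the statement is the Claim_ definition above) =====
theorem opp_filter_for_child_py_spec : Claim_equal_opp_filter_for_child_py := by
  intro s _
  unfold Spec_opp_filter_for_child_py opp_filter_for_child_py opp_filter_for_child_py_alt
  simp only [List.foldl]
  have key : ∀ l : List Char,
      PySem.Chars.replace (PySem.Chars.replace (PySem.Chars.replace (PySem.Chars.replace l
        "Technical_Lead__r.".toList "Opportunity__r.Technical_Lead__r.".toList)
        "FY_16_Owner_Team__c".toList "Opportunity__r.FY_16_Owner_Team__c".toList)
        "Owner.UserRole.Name".toList "Opportunity__r.Owner.UserRole.Name".toList)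
        "Owner.Name".toList "Opportunity__r.Owner.Name".toList = pvScan l := by
    intro l
    rw [pvReplace_eq _ _ _ (by decide), pvReplace_eq _ _ _ (by decide),
      pvReplace_eq _ _ _ (by decide), pvReplace_eq _ _ _ (by decide)]
    have e1 : "Technical_Lead__r.".toList = pvP1 := rfl
    have e2 : "FY_16_Owner_Team__c".toList = pvP2 := rfl
    have e3 : "Owner.UserRole.Name".toList = pvP3 := rfl
    have e4 : "Owner.Name".toList = pvP4 := rfl
    have f1 : "Opportunity__r.Technical_Lead__r.".toList = pvN1 := by decide
    have f2 : "Opportunity__r.FY_16_Owner_Team__c".toList = pvN2 := by decide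
    have f3 : "Opportunity__r.Owner.UserRole.Name".toList = pvN3 := by decide
    have f4 : "Opportunity__r.Owner.Name".toList = pvN4 := by decide
    rw [e1, e2, e3, e4, f1, f2, f3, f4]
    exact pvChain_eq_scan l
  refine String.toList_inj.mp ?_
  simp only [PySem.Str.toList_replace]
  rw [key s.toList]
  simp
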